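-- pv_equiv track=rewrite | github.com/denkarateev/Aura-backend | main4.py | mix_slots_for_rating
-- ===== SOURCE A (Python) =====
-- MIX_SLOT_RULES = [
--     (0, 2),
--     (100, 4),
--     (300, 6),
--     (700, 8),
--     (1500, 10),
-- ]
--
-- def mix_slots_for_rating(rating: int) -> int:
--     slots = MIX_SLOT_RULES[0][1]
--     for threshold, candidate in MIX_SLOT_RULES:
--         if rating >= threshold:
--             slots = candidate
--         else:
--             break
--     return slots
-- ===== SOURCE B (Python) =====
-- def mix_slots_for_rating(rating: int) -> int:
--     if rating >= 1500:
--         return 10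
--     elif rating >= 700:
--         return 8
--     elif rating >= 300:
--         return 6
--     elif rating >= 100:
--         return 4
--     else:
--         return 2
-- ===== Notes on version B (the rewrite author's own statement) =====
-- stated objective: idiomatic
-- what changed: Replaced the loop over the MIX_SLOT_RULES table (with mutable accumulator and break) by a direct descending if/elif comparison chain over the threshold constants.
import Mathlib
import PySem

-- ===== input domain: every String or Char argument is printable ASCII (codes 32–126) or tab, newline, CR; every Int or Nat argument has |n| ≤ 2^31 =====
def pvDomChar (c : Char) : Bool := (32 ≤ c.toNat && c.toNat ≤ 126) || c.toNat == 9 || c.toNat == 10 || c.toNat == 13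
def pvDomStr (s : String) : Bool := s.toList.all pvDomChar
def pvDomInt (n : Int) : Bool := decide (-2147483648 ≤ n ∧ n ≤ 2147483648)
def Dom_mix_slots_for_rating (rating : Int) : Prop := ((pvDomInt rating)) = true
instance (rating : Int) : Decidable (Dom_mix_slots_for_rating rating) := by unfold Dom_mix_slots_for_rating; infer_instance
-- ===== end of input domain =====

-- B replaces A's table scan with a direct descending if/elif chain (idiomatic, no table).

-- ===== PORT A =====
def MIX_SLOT_RULES : List (Int × Int) := [(0, 2), (100, 4), (300, 6), (700, 8), (1500, 10)]

-- A's loop with break, as structural recursion over the rules list carrying the slots accumulator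
def mixSlotsLoop (rating : Int) (slots : Int) : List (Int × Int) → Int
  | [] => slots
  | (threshold, candidate) :: rest =>
      if rating ≥ threshold then mixSlotsLoop rating candidate rest
      else slots

def mix_slots_for_rating (rating : Int) : Int :=
  mixSlotsLoop rating 2 MIX_SLOT_RULES   -- slots = MIX_SLOT_RULES[0][1] = 2

-- ===== PORT B =====
def mix_slots_for_rating_alt (rating : Int) : Int :=
  if rating ≥ 1500 then 10
  else if rating ≥ 700 then 8
  else if rating ≥ 300 then 6
  else if rating ≥ 100 then 4
  else 2

-- ===== PRECONDITION & SPEC =====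
def Spec_mix_slots_for_rating (rating : Int) (out : Int) : Prop := out = mix_slots_for_rating_alt rating
instance (rating : Int) (out : Int) : Decidable (Spec_mix_slots_for_rating rating out) := by unfold Spec_mix_slots_for_rating; infer_instance

-- ===== CLAIM (what is proved, stated in full; the proofs are below) =====
def Claim_equal_mix_slots_for_rating : Prop := ∀ (rating : Int), Dom_mix_slots_for_rating rating → Spec_mix_slots_for_rating rating (mix_slots_for_rating rating)

-- ===== LEMMAS AND PROOFS =====

-- ===== VERDICT (by name: the statement is the Claim_ definition above) =====
theorem mix_slots_for_rating_spec : Claim_equal_mix_slots_for_rating := by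
  intro rating _
  unfold Spec_mix_slots_for_rating mix_slots_for_rating mix_slots_for_rating_alt
  simp only [MIX_SLOT_RULES, mixSlotsLoop]
  split_ifs <;> omega
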